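-- pv_equiv track=rewrite | github.com/Eurus90/arch-configs-programming | income_predictor/income_predictor.py | aboveBelowTestList
-- ===== SOURCE A (Python) =====
-- def aboveBelowTestList(net_file):
--     # get list of data for >50k, <=50k and a test data set
--     list_count = 0
--     total_count = 0
--     above_list = []
--     below_list = []
--     test_list = []
--     for linestring in net_file:
--         total_count += 1
--         list_total = int(len(net_file) * 0.75) # split data set 75, 25
--         list_count += 1
--         line_list = linestring.split(", ")
--         if list_count < list_total:
--             if line_list[-1] == ">50K":
--                 above_list.append(linestring)
--             elif line_list[-1] == "<=50K":
--                 below_list.append(linestring)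
--         if list_total < total_count:
--             test_list.append(linestring)
--
--     return above_list, below_list, test_list
-- ===== SOURCE B (Python) =====
-- def aboveBelowTestList(net_file):
--     # 75/25 split: first three quarters are classified, the rest is the test set.
--     cutoff = 3 * len(net_file) // 4
--     head = net_file[:cutoff]
--     above_list = [line for line in head if line.split(", ")[-1] == ">50K"]
--     below_list = [line for line in head if line.split(", ")[-1] == "<=50K"]
--     return above_list, below_list, list(net_file[cutoff:])
-- ===== Notes on version B (the rewrite author's own statement) =====
-- stated objective: simpler
-- what changed: Replaces the counter-driven loop (which recomputes the cutoff every iteration and skips the element at index cutoff-1) by computing the cutoff once, slicing the list into head/tail, and building the two class lists as filters of the head.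
-- intended difference: On inputs where the element at index 3*len//4 - 1 exists and its last comma-field is '>50K' or '<=50K', A silently drops that element from both the training lists and the test list (its 'list_count < list_total' is an off-by-one), while B classifies it into above/below as the 75/25 split intends. — e.g. on aboveBelowTestList(["a, >50K", "b, <=50K"]): A returns ([], [], ["b, <=50K"]), B returns (["a, >50K"], [], ["b, <=50K"])
import Mathlib
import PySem

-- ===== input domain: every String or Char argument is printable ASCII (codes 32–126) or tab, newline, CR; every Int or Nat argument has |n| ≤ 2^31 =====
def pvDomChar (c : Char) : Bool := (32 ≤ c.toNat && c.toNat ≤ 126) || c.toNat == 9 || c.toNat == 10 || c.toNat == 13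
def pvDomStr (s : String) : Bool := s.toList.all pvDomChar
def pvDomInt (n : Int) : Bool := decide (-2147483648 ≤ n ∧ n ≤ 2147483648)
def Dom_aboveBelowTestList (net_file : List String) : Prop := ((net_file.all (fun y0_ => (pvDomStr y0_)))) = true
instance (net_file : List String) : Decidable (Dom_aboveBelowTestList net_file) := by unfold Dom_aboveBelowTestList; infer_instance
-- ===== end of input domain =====

-- B computes the 75% cutoff once and slices + filters instead of A's counter-driven loop;
-- unlike A it does not drop the element at index cutoff-1 (A's off-by-one), see D_ below.

-- ===== PORT A =====
-- loop body of A's 'for linestring in net_file', named for the proofs; state =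
-- (list_count, total_count, above_list, below_list, test_list).
-- int(len(net_file) * 0.75) is ported as 3*len/4: 0.75 is 3/4 exactly in binary floating
-- point, so len*0.75 is the exact rational 3n/4 for every list the sandbox can hold and
-- int() truncates it to ⌊3n/4⌋.
-- line_list[-1] is ported with pyGetD (default never used: split(", ") is never empty).
def aboveBelowTestListStep (net_file : List String)
    (st : Int × Int × List String × List String × List String) (linestring : String) :
    Int × Int × List String × List String × List String :=
  let total_count := st.2.1 + 1
  let list_total : Int := ((3 * net_file.length / 4 : Nat) : Int)
  let list_count := st.1 + 1
  let line_list := (PySem.Str.split? linestring ", ").getD []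
  let ab :=
    if list_count < list_total then
      if PySem.List.pyGetD line_list (-1) "" == ">50K" then (st.2.2.1 ++ [linestring], st.2.2.2.1)
      else if PySem.List.pyGetD line_list (-1) "" == "<=50K" then (st.2.2.1, st.2.2.2.1 ++ [linestring])
      else (st.2.2.1, st.2.2.2.1)
    else (st.2.2.1, st.2.2.2.1)
  let test_list := if list_total < total_count then st.2.2.2.2 ++ [linestring] else st.2.2.2.2
  (list_count, total_count, ab.1, ab.2, test_list)

def aboveBelowTestList (net_file : List String) : List String × List String × List String :=
  let fin := net_file.foldl (aboveBelowTestListStep net_file) (0, 0, [], [], [])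
  (fin.2.2.1, fin.2.2.2.1, fin.2.2.2.2)

-- ===== PORT B =====
def aboveBelowTestList_alt (net_file : List String) : List String × List String × List String :=
  let cutoff : Nat := 3 * net_file.length / 4
  let head := PySem.List.slice net_file none (some (cutoff : Int))
  let above_list := head.filter
    (fun line => PySem.List.pyGetD ((PySem.Str.split? line ", ").getD []) (-1) "" == ">50K")
  let below_list := head.filter
    (fun line => PySem.List.pyGetD ((PySem.Str.split? line ", ").getD []) (-1) "" == "<=50K")
  (above_list, below_list, PySem.List.slice net_file (some (cutoff : Int)) none)

-- ===== PRECONDITION & SPEC =====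
-- On inputs where the element at index 3*len//4 - 1 exists and carries one of the two
-- class labels as its last ", "-field (i.e. the line IS '>50K'/'<=50K' or ends with
-- ', >50K'/', <=50K'), A silently drops that element from both the training lists and
-- the test list (its 'list_count < list_total' is an off-by-one), while B classifies it
-- into above/below as the 75/25 split intends.
def D_aboveBelowTestList (net_file : List String) : Prop :=
  let x := net_file.getD (net_file.length * 3 / 4 - 1) ""
  1 ≤ net_file.length * 3 / 4 ∧
    (x ∈ ([">50K", "<=50K"] : List String) ∨
     (PySem.Str.endswith x ", >50K" || PySem.Str.endswith x ", <=50K") = true)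
instance (net_file : List String) : Decidable (D_aboveBelowTestList net_file) := by
  unfold D_aboveBelowTestList; infer_instance

def Spec_aboveBelowTestList (net_file : List String) (out : List String × List String × List String) : Prop :=
  ¬ D_aboveBelowTestList net_file → out = aboveBelowTestList_alt net_file
instance (net_file : List String) (out : List String × List String × List String) : Decidable (Spec_aboveBelowTestList net_file out) := by unfold Spec_aboveBelowTestList; infer_instance

def pvDiffWitness_aboveBelowTestList : List String := ["a, >50K", "b, <=50K"]
def pvDiffWitnessOut_aboveBelowTestList :
    (List String × List String × List String) × (List String × List String × List String) :=
  (([], [], ["b, <=50K"]), (["a, >50K"], [], ["b, <=50K"]))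

-- ===== CLAIM (what is proved, stated in full; the proofs are below) =====
def Claim_unchanged_aboveBelowTestList : Prop := ∀ (net_file : List String), Dom_aboveBelowTestList net_file → Spec_aboveBelowTestList net_file (aboveBelowTestList net_file)
def Claim_changed_aboveBelowTestList : Prop := Dom_aboveBelowTestList (pvDiffWitness_aboveBelowTestList) ∧ D_aboveBelowTestList (pvDiffWitness_aboveBelowTestList) ∧ aboveBelowTestList (pvDiffWitness_aboveBelowTestList) = pvDiffWitnessOut_aboveBelowTestList.1 ∧ aboveBelowTestList_alt (pvDiffWitness_aboveBelowTestList) = pvDiffWitnessOut_aboveBelowTestList.2 ∧ pvDiffWitnessOut_aboveBelowTestList.1 ≠ pvDiffWitnessOut_aboveBelowTestList.2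
def Claim_exact_aboveBelowTestList : Prop := ∀ (net_file : List String), Dom_aboveBelowTestList net_file → D_aboveBelowTestList net_file → aboveBelowTestList net_file ≠ aboveBelowTestList_alt net_file

-- ===== LEMMAS AND PROOFS =====

-- the two Bool tests both programs apply to a line, abbreviated for the proofs
def pAbove (s : String) : Bool :=
  PySem.List.pyGetD ((PySem.Str.split? s ", ").getD []) (-1) "" == ">50K"
def pBelow (s : String) : Bool :=
  PySem.List.pyGetD ((PySem.Str.split? s ", ").getD []) (-1) "" == "<=50K"

-- the last ", "-field of a line is a given separator-free word w iff the line is w or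
-- ends with ", " ++ w; proved from splitOn's recursion (go), via the spec function
-- lastChunk below (", " never overlaps itself, so the greedy scan hits every occurrence)
def lastChunk : List Char → List Char → List Char
  | [], cur => cur.reverse
  | c :: rest, cur =>
    if [',', ' '].isPrefixOf (c :: rest) then lastChunk ((c :: rest).drop 2) []
    else lastChunk rest (c :: cur)
termination_by l _ => l.length
decreasing_by all_goals simp

lemma go_getLast? : ∀ (fuel : Nat) (l cur : List Char) (acc : List (List Char)), l.length < fuel →
    (PySem.Chars.splitOn.go [',', ' '] fuel l cur acc).getLast? = some (lastChunk l cur) := by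
  intro fuel
  induction fuel with
  | zero => intro l cur acc h; omega
  | succ f ih =>
    intro l cur acc h
    cases l with
    | nil => simp [PySem.Chars.splitOn.go, lastChunk, List.getLast?_reverse]
    | cons c rest =>
      rw [PySem.Chars.splitOn.go]
      by_cases hp : [',', ' '].isPrefixOf (c :: rest)
      · simp only [hp, if_true]
        rw [ih _ _ _ (by simp at h ⊢; omega)]
        rw [lastChunk]
        simp [hp]
      · simp only [hp, Bool.false_eq_true, if_false]
        rw [ih _ _ _ (by simp at h ⊢; omega)]
        rw [lastChunk]
        simp [hp]



lemma lastChunk_no_sep (l cur : List Char) (h : ¬ [',', ' '] <:+: l) : lastChunk l cur = cur.reverse ++ l := by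
  induction l, cur using lastChunk.induct with
  | case1 cur => simp [lastChunk]
  | case2 c rest cur hp ih =>
    exact absurd (List.isPrefixOf_iff_prefix.mp hp).isInfix h
  | case3 c rest cur hp ih =>
    rw [lastChunk, if_neg hp, ih (fun hi => h (List.infix_cons hi))]
    simp

lemma lastChunk_forward (t : List Char) (hns : ¬ [',', ' '] <:+: t) :
    ∀ (n : Nat) (l cur : List Char), l.length ≤ n → [',', ' '] ++ t <:+ l → lastChunk l cur = t := by
  intro n
  induction n with
  | zero =>
    intro l cur hl hsuf
    have hnil : l = [] := List.eq_nil_iff_length_eq_zero.mpr (by omega)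
    subst hnil
    have := List.eq_nil_of_suffix_nil hsuf
    simp at this
  | succ n ih =>
    intro l cur hl hsuf
    cases l with
    | nil =>
      have := List.eq_nil_of_suffix_nil hsuf
      simp at this
    | cons c rest =>
      obtain ⟨p, hp2⟩ := hsuf
      by_cases hp : [',', ' '].isPrefixOf (c :: rest)
      · rw [lastChunk, if_pos hp]
        cases p with
        | nil =>
          have hdrop : (c :: rest).drop 2 = t := by
            rw [← hp2]; rfl
          rw [hdrop, lastChunk_no_sep t [] hns]; simp
        | cons x p' =>
          cases p' with
          | nil =>
            exfalso
            obtain ⟨q, hq⟩ := List.isPrefixOf_iff_prefix.mp hp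
            simp at hp2 hq
            obtain ⟨-, hrest⟩ := hp2
            obtain ⟨-, hrest'⟩ := hq
            rw [← hrest'] at hrest
            simp at hrest
          | cons y p'' =>
            apply ih _ _ (by simp at hl ⊢; omega)
            exact ⟨p'', by have := congrArg (List.drop 2) hp2; simpa using this⟩
      · rw [lastChunk, if_neg hp]
        cases p with
        | nil =>
          exfalso
          apply hp
          rw [← hp2]
          exact List.isPrefixOf_iff_prefix.mpr ⟨t, by simp⟩
        | cons x p' =>
          apply ih _ _ (by simp at hl ⊢; omega)
          exact ⟨p', (by simpa using hp2 : x = c ∧ _).2⟩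

lemma lastChunk_backward : ∀ (l cur t : List Char), lastChunk l cur = t →
    cur.reverse ++ l = t ∨ [',', ' '] ++ t <:+ l := by
  intro l cur
  induction l, cur using lastChunk.induct with
  | case1 cur => intro t h; left; simpa [lastChunk] using h
  | case2 c rest cur hp ih =>
    intro t h
    rw [lastChunk, if_pos hp] at h
    obtain ⟨q, hq⟩ := List.isPrefixOf_iff_prefix.mp hp
    have hdq : (c :: rest).drop 2 = q := by rw [← hq]; rfl
    rcases ih t h with h' | h'
    · right
      refine ⟨[], ?_⟩
      simp only [List.reverse_nil, List.nil_append] at h'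
      rw [hdq] at h'
      simp [← hq, h']
    · right
      exact h'.trans (List.drop_suffix 2 (c :: rest))
  | case3 c rest cur hp ih =>
    intro t h
    rw [lastChunk, if_neg hp] at h
    rcases ih t h with h' | h'
    · left; rw [← h']; simp
    · right; exact h'.trans (List.suffix_cons c rest)

lemma lastChunk_label (sl t : List Char) (hns : ¬ [',', ' '] <:+: t) :
    lastChunk sl [] = t ↔ (sl = t ∨ [',', ' '] ++ t <:+ sl) := by
  constructor
  · intro h
    simpa using lastChunk_backward sl [] t h
  · rintro (rfl | h)
    · rw [lastChunk_no_sep sl [] hns]; simp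
    · exact lastChunk_forward t hns sl.length sl [] le_rfl h

lemma pvField_eq (s : String) :
    PySem.List.pyGetD ((PySem.Str.split? s ", ").getD []) (-1) ""
      = String.ofList (lastChunk s.toList []) := by
  have hsep : (", " : String).toList = [',', ' '] := rfl
  have h1 : PySem.Str.split? s ", "
      = some ((PySem.Chars.splitOn s.toList [',', ' ']).map String.ofList) := by
    simp [PySem.Str.split?, PySem.Chars.split?, hsep]
  have hgo : (PySem.Chars.splitOn s.toList [',', ' ']).getLast? = some (lastChunk s.toList []) := by
    rw [PySem.Chars.splitOn]
    exact go_getLast? (s.toList.length + 1) s.toList [] [] (by omega)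
  have h2 : ((PySem.Chars.splitOn s.toList [',', ' ']).map String.ofList).getLast?
      = some (String.ofList (lastChunk s.toList [])) := by
    rw [List.getLast?_map, hgo]; rfl
  have hne : (PySem.Chars.splitOn s.toList [',', ' ']).map String.ofList ≠ [] := by
    intro hcontra
    rw [hcontra] at h2; simp at h2
  rw [h1]
  simp only [Option.getD_some]
  rw [PySem.List.pyGetD_neg_one _ "" hne]
  rw [List.getLast?_eq_some_getLast hne] at h2
  exact (Option.some.injEq _ _).mp h2


lemma field_label_iff (s w : String) (hns : ¬ [',', ' '] <:+: w.toList) :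
    (PySem.List.pyGetD ((PySem.Str.split? s ", ").getD []) (-1) "" == w) = true
      ↔ (s = w ∨ PySem.Str.endswith s (String.append ", " w) = true) := by
  rw [beq_iff_eq, pvField_eq]
  have hof : ∀ u : List Char, (String.ofList u = w) ↔ (u = w.toList) := by
    intro u
    constructor
    · intro h; rw [← h, String.toList_ofList]
    · intro h; rw [h]; exact String.toList_inj.mp (by rw [String.toList_ofList])
  rw [hof, lastChunk_label _ _ hns]
  have hsuffix : ([',', ' '] ++ w.toList <:+ s.toList)
      ↔ PySem.Str.endswith s (String.append ", " w) = true := by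
    rw [PySem.Str.endswith_eq, PySem.Chars.endswith_iff]
    have : (String.append ", " w).toList = [',', ' '] ++ w.toList := by
      show (", " ++ w).toList = _
      rw [String.toList_append]
      rfl
    rw [this]
  rw [hsuffix]
  constructor
  · rintro (h | h)
    · left; exact String.toList_inj.mp h
    · right; exact h
  · rintro (rfl | h)
    · left; rfl
    · right; exact h

lemma D_iff (net_file : List String) : D_aboveBelowTestList net_file ↔
    (1 ≤ 3 * net_file.length / 4 ∧
      (net_file.getD (3 * net_file.length / 4 - 1) "" = ">50K" ∨
       PySem.Str.endswith (net_file.getD (3 * net_file.length / 4 - 1) "") ", >50K" = true ∨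
       net_file.getD (3 * net_file.length / 4 - 1) "" = "<=50K" ∨
       PySem.Str.endswith (net_file.getD (3 * net_file.length / 4 - 1) "") ", <=50K" = true)) := by
  unfold D_aboveBelowTestList
  rw [Nat.mul_comm net_file.length 3]
  simp only [List.mem_cons, Bool.or_eq_true]
  tauto

lemma pAbove_iff (s : String) :
    pAbove s = true ↔ (s = ">50K" ∨ PySem.Str.endswith s ", >50K" = true) := by
  have h := field_label_iff s ">50K" (by decide)
  have happ : (String.append ", " ">50K") = ", >50K" := by decide
  rw [happ] at h
  exact h

lemma pBelow_iff (s : String) :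
    pBelow s = true ↔ (s = "<=50K" ∨ PySem.Str.endswith s ", <=50K" = true) := by
  have h := field_label_iff s "<=50K" (by decide)
  have happ : (String.append ", " "<=50K") = ", <=50K" := by decide
  rw [happ] at h
  exact h

lemma not_above_and_below (s : String) : (!pAbove s && pBelow s) = pBelow s := by
  by_cases h : pBelow s = true
  · have hfield : PySem.List.pyGetD ((PySem.Str.split? s ", ").getD []) (-1) "" = "<=50K" := by
      simpa [pBelow] using h
    simp [pAbove, h, hfield]
  · simp [Bool.not_eq_true] at h
    simp [h]

-- closed form of A's loop: starting with both counters at i, A classifies exactly the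
-- elements of l at global 1-based position < cutoff and tests those at position > cutoff
lemma loopA (net_file l : List String) (i : Nat) (A B T : List String) :
    l.foldl (aboveBelowTestListStep net_file) (((i : Nat) : Int), ((i : Nat) : Int), A, B, T)
      = (((i + l.length : Nat) : Int), ((i + l.length : Nat) : Int),
         A ++ (l.take (3 * net_file.length / 4 - 1 - i)).filter pAbove,
         B ++ (l.take (3 * net_file.length / 4 - 1 - i)).filter (fun s => !pAbove s && pBelow s),
         T ++ l.drop (3 * net_file.length / 4 - i)) := by
  induction l generalizing i A B T with
  | nil => simp
  | cons x t ih =>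
    have hstep : aboveBelowTestListStep net_file (((i : Nat) : Int), ((i : Nat) : Int), A, B, T) x
        = (((i + 1 : Nat) : Int), ((i + 1 : Nat) : Int),
           (if i + 1 < 3 * net_file.length / 4 ∧ pAbove x then A ++ [x] else A),
           (if i + 1 < 3 * net_file.length / 4 ∧ (!pAbove x && pBelow x) then B ++ [x] else B),
           (if 3 * net_file.length / 4 < i + 1 then T ++ [x] else T)) := by
      simp only [aboveBelowTestListStep, pAbove, pBelow]
      by_cases hc : i + 1 < 3 * net_file.length / 4 <;>
        by_cases ht : 3 * net_file.length / 4 < i + 1 <;>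
        by_cases ha : PySem.List.pyGetD ((PySem.Str.split? x ", ").getD []) (-1) "" == ">50K" <;>
        by_cases hb : PySem.List.pyGetD ((PySem.Str.split? x ", ").getD []) (-1) "" == "<=50K" <;>
        simp [hc, ht, ha, hb] <;> first | omega | (split_ifs <;> simp_all <;> omega)
    rw [List.foldl_cons, hstep, ih (i + 1)]
    have hc := Nat.lt_or_ge (i + 1) (3 * net_file.length / 4)
    rcases hc with hc | hc
    · have htake : (x :: t).take (3 * net_file.length / 4 - 1 - i)
          = x :: t.take (3 * net_file.length / 4 - 1 - (i + 1)) := by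
        have : 3 * net_file.length / 4 - 1 - i = (3 * net_file.length / 4 - 1 - (i + 1)) + 1 := by omega
        rw [this]; rfl
      have hdrop : (x :: t).drop (3 * net_file.length / 4 - i)
          = t.drop (3 * net_file.length / 4 - (i + 1)) := by
        have : 3 * net_file.length / 4 - i = (3 * net_file.length / 4 - (i + 1)) + 1 := by omega
        rw [this]; rfl
      have hnt : ¬ 3 * net_file.length / 4 < i + 1 := by omega
      simp only [hc, hnt, htake, hdrop, List.filter_cons, true_and,
        Prod.mk.injEq]
      refine ⟨by simp [List.length_cons]; omega, by simp [List.length_cons]; omega, ?_, ?_, rfl⟩ <;>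
        by_cases ha : pAbove x <;> by_cases hb : pBelow x <;>
          simp [ha, hb, List.append_assoc]
    · have htake : (x :: t).take (3 * net_file.length / 4 - 1 - i) = [] := by
        have : 3 * net_file.length / 4 - 1 - i = 0 := by omega
        rw [this]; rfl
      have htake' : t.take (3 * net_file.length / 4 - 1 - (i + 1)) = t.take 0 := by
        have : 3 * net_file.length / 4 - 1 - (i + 1) = 0 := by omega
        rw [this]
      have hnc : ¬ (i + 1 < 3 * net_file.length / 4) := by omega
      by_cases heq : 3 * net_file.length / 4 < i + 1
      · have hdrop : (x :: t).drop (3 * net_file.length / 4 - i) = x :: t := by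
          have : 3 * net_file.length / 4 - i = 0 := by omega
          rw [this, List.drop_zero]
        have hdrop' : t.drop (3 * net_file.length / 4 - (i + 1)) = t := by
          have : 3 * net_file.length / 4 - (i + 1) = 0 := by omega
          rw [this, List.drop_zero]
        simp only [hnc, heq, htake, htake', hdrop, hdrop', false_and, if_false,
          List.take_zero, List.filter_nil, List.append_nil, Prod.mk.injEq]
        and_intros <;> (try simp [List.length_cons]) <;> omega
      · -- i + 1 = cutoff exactly: skipped element
        have hdrop : (x :: t).drop (3 * net_file.length / 4 - i)
            = t.drop (3 * net_file.length / 4 - (i + 1)) := by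
          have h1 : 3 * net_file.length / 4 - i = 1 := by omega
          have h2 : 3 * net_file.length / 4 - (i + 1) = 0 := by omega
          rw [h1, h2]; rfl
        simp only [hnc, heq, htake, htake', hdrop, false_and, if_false,
          List.take_zero, List.filter_nil, List.append_nil, Prod.mk.injEq]
        and_intros <;> (try simp [List.length_cons]) <;> omega

-- both ports in closed form
lemma portA_eq (net_file : List String) :
    aboveBelowTestList net_file
      = ((net_file.take (3 * net_file.length / 4 - 1)).filter pAbove,
         (net_file.take (3 * net_file.length / 4 - 1)).filter pBelow,
         net_file.drop (3 * net_file.length / 4)) := by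
  have h := loopA net_file net_file 0 [] [] []
  simp only [Nat.cast_zero, Nat.zero_add, List.nil_append, Nat.sub_zero] at h
  simp only [aboveBelowTestList, h]
  congr 2
  exact List.filter_congr (fun x _ => not_above_and_below x)

lemma portB_eq (net_file : List String) :
    aboveBelowTestList_alt net_file
      = ((net_file.take (3 * net_file.length / 4)).filter pAbove,
         (net_file.take (3 * net_file.length / 4)).filter pBelow,
         net_file.drop (3 * net_file.length / 4)) := by
  simp only [aboveBelowTestList_alt, PySem.List.slice_to_natCast, PySem.List.slice_from_natCast]
  rfl

-- the element A skips: with c = 3n/4 ≥ 1 it is net_file[c-1], and take c = take (c-1) ++ [it]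
lemma take_cutoff (net_file : List String) (h : 1 ≤ 3 * net_file.length / 4) :
    net_file.take (3 * net_file.length / 4)
      = net_file.take (3 * net_file.length / 4 - 1)
        ++ [net_file.getD (3 * net_file.length / 4 - 1) ""] := by
  have hlt : 3 * net_file.length / 4 - 1 < net_file.length := by omega
  have : 3 * net_file.length / 4 = (3 * net_file.length / 4 - 1) + 1 := by omega
  rw [this, List.take_add_one]
  simp [List.getElem?_eq_getElem hlt]

-- ===== VERDICT (by name: the statement is the Claim_ definition above) =====
theorem aboveBelowTestList_spec : Claim_unchanged_aboveBelowTestList := by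
  intro net_file _ hD
  rw [D_iff] at hD
  rw [portA_eq, portB_eq]
  by_cases hc : 1 ≤ 3 * net_file.length / 4
  · rw [not_and_or, not_or, not_or, not_or] at hD
    rcases hD with hD | ⟨hD1, hD2, hD3, hD4⟩
    · omega
    · have hxa : pAbove (net_file.getD (3 * net_file.length / 4 - 1) "") = false := by
        rw [← Bool.not_eq_true, pAbove_iff]; tauto
      have hxb : pBelow (net_file.getD (3 * net_file.length / 4 - 1) "") = false := by
        rw [← Bool.not_eq_true, pBelow_iff]; tauto
      rw [take_cutoff net_file hc]
      simp only [List.getD_eq_getElem?_getD] at hxa hxb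
      simp [List.filter_append, hxa, hxb]
  · have h0 : 3 * net_file.length / 4 = 0 := by omega
    simp [h0]

theorem aboveBelowTestList_changed : Claim_changed_aboveBelowTestList := by
  unfold Claim_changed_aboveBelowTestList; decide

theorem aboveBelowTestList_tight : Claim_exact_aboveBelowTestList := by
  intro net_file _ hD heq
  rw [D_iff] at hD
  rcases hD with ⟨hc, hfield⟩
  rw [portA_eq, portB_eq, take_cutoff net_file hc] at heq
  have hab : pAbove (net_file.getD (3 * net_file.length / 4 - 1) "") = true ∨
      pBelow (net_file.getD (3 * net_file.length / 4 - 1) "") = true := by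
    rcases hfield with h | h | h | h
    · exact Or.inl (pAbove_iff _ |>.mpr (Or.inl h))
    · exact Or.inl (pAbove_iff _ |>.mpr (Or.inr h))
    · exact Or.inr (pBelow_iff _ |>.mpr (Or.inl h))
    · exact Or.inr (pBelow_iff _ |>.mpr (Or.inr h))
  simp only [List.getD_eq_getElem?_getD] at hab
  rcases hab with h | h
  · have h1 := congrArg (fun p => p.1.length) heq
    simp [List.filter_append, h] at h1
  · have h2 := congrArg (fun p => p.2.1.length) heq
    simp [List.filter_append, h] at h2
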